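-- pv_equiv track=rewrite | github.com/thehalleyyoung/deppy | tests/test_examples/043_suffix_tree_ukkonen.py | SPEC
-- ===== SOURCE A (Python) =====
-- def SPEC(text, patterns, result):
--     # Verify substring queries by brute-force search
--     if not isinstance(result, list):
--         return False
--     if len(result) != len(patterns):
--         return False
--     for i, pat in enumerate(patterns):
--         expected = pat in text
--         if result[i] != expected:
--             return False
--     return True
-- ===== SOURCE B (Python) =====
-- def SPEC(text, patterns, result):
--     # Index the text's substrings by length once; each query is a set lookup.
--     if not isinstance(result, list) or len(result) != len(patterns):
--         return False
--     n = len(text)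
--     index = {L: {text[i:i + L] for i in range(n - L + 1)}
--              for L in {len(p) for p in patterns}}
--     return all(r == (p in index[len(p)]) for p, r in zip(patterns, result))
-- ===== Notes on version B (the rewrite author's own statement) =====
-- stated objective: alternative
-- what changed: Instead of running a substring scan of the text for every pattern, B builds, once, a hash set of all substrings of the text for each distinct pattern length, so each pattern is verified by a single set lookup.
import Mathlib
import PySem

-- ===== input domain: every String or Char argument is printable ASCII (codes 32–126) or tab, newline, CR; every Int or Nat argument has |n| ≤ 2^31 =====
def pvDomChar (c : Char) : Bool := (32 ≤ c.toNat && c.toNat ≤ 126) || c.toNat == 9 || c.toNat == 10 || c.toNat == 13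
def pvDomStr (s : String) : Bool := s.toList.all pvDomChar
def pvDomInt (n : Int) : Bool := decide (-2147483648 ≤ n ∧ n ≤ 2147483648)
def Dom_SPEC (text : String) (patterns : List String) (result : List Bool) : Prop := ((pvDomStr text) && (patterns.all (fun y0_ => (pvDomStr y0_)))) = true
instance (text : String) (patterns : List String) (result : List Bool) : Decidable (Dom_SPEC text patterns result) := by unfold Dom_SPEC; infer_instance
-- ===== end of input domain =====

-- B re-implements A's per-pattern text scan by indexing the text's substrings by
-- pattern length once and answering each pattern with a set lookup (objective: alternative).

-- ===== PORT A =====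
-- the 'for i, pat in enumerate(patterns)' loop with its early 'return False'
-- (result[i] is in range here: the caller checks len(result) == len(patterns) first)
def pvLoopA (text : String) (result : List Bool) : List (Int × String) → Bool
  | [] => true
  | (i, pat) :: rest =>
    let expected := PySem.Str.isIn pat text
    if PySem.List.pyGetD result i false ≠ expected then false
    else pvLoopA text result rest

def SPEC (text : String) (patterns : List String) (result : List Bool) : Bool :=
  -- 'isinstance(result, list)' is always true under the type convention
  if PySem.List.len result ≠ PySem.List.len patterns then false
  else pvLoopA text result (PySem.List.enumerate patterns)

-- ===== PORT B =====
-- {text[i:i+L] for i in range(n - L + 1)}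
def pvSubsOfLen (text : String) (n L : Int) : PySem.Set String :=
  PySem.Set.ofList ((PySem.List.pyRange 0 (n - L + 1) 1).map
    (fun i => PySem.Str.slice text (some i) (some (i + L))))

def SPEC_alt (text : String) (patterns : List String) (result : List Bool) : Bool :=
  if PySem.List.len result ≠ PySem.List.len patterns then false
  else
    let n : Int := PySem.Str.len text
    let lens : PySem.Set Int := PySem.Set.ofList (patterns.map (fun p => PySem.Str.len p))
    let index : PySem.Dict Int (PySem.Set String) :=
      lens.foldl (fun d L => d.insert L (pvSubsOfLen text n L)) PySem.Dict.empty
    (patterns.zip result).all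
      (fun pr => pr.2 == PySem.Set.contains (index.getD (PySem.Str.len pr.1) []) pr.1)

-- ===== PRECONDITION & SPEC =====
def Spec_SPEC (text : String) (patterns : List String) (result : List Bool) (out : Bool) : Prop := out = SPEC_alt text patterns result
instance (text : String) (patterns : List String) (result : List Bool) (out : Bool) : Decidable (Spec_SPEC text patterns result out) := by unfold Spec_SPEC; infer_instance

-- ===== CLAIM (what is proved, stated in full; the proofs are below) =====
def Claim_equal_SPEC : Prop := ∀ (text : String) (patterns : List String) (result : List Bool), Dom_SPEC text patterns result → Spec_SPEC text patterns result (SPEC text patterns result)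

-- ===== LEMMAS AND PROOFS =====

-- Bool 'all' congruence on members
theorem pvAll_congr_mem {α : Type} (l : List α) (p q : α → Bool)
    (h : ∀ a ∈ l, p a = q a) : l.all p = l.all q := by
  induction l with
  | nil => rfl
  | cons x t ih =>
    simp only [List.all_cons, h x (by simp), ih (fun a ha => h a (by simp [ha]))]

-- the substring-by-length set answers exactly 'p in text' when queried at L = len(p)
theorem pvSubs_mem_iff (text p : String) :
    p ∈ pvSubsOfLen text (PySem.Str.len text) (PySem.Str.len p)
      ↔ PySem.Str.isIn p text = true := by
  unfold pvSubsOfLen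
  rw [PySem.Set.mem_ofList, PySem.Str.isIn_eq, ← PySem.Chars.exists_prefix_drop_iff_isIn]
  simp only [List.mem_map, PySem.List.mem_pyRange_one, PySem.Str.len_eq]
  constructor
  · rintro ⟨i, ⟨h0, _⟩, heq⟩
    refine ⟨i.toNat, ?_⟩
    have ht := congrArg String.toList heq
    rw [PySem.Str.toList_slice, PySem.Chars.slice_eq_listSlice,
        PySem.List.slice_toNat _ h0 (by omega)] at ht
    rw [← ht]
    exact List.take_prefix _ _
  · rintro ⟨j, hpre⟩
    have hlen : p.toList.length ≤ text.toList.length - j := by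
      have := hpre.length_le
      simpa using this
    by_cases hj : j + p.toList.length ≤ text.toList.length
    · refine ⟨(j : Int), ⟨by omega, by omega⟩, ?_⟩
      apply String.toList_inj.mp
      rw [PySem.Str.toList_slice, PySem.Chars.slice_eq_listSlice,
          PySem.List.slice_toNat _ (by omega) (by omega)]
      have hk : ((j : Int) + (p.toList.length : Int)).toNat - (j : Int).toNat
          = p.toList.length := by omega
      rw [hk]
      simp only [Int.toNat_natCast]
      exact (List.prefix_iff_eq_take.mp hpre).symm
    · -- j points past the text, so p must be empty; index 0 then works
      have hp0 : p.toList = [] := by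
        have : p.toList.length = 0 := by omega
        exact List.eq_nil_of_length_eq_zero this
      refine ⟨0, ⟨by omega, by simp [hp0]⟩, ?_⟩
      apply String.toList_inj.mp
      rw [PySem.Str.toList_slice, PySem.Chars.slice_eq_listSlice,
          PySem.List.slice_toNat _ (by omega) (by omega)]
      simp [hp0]

-- inserting fresh distinct keys into the empty dict preserves key uniqueness …
theorem pvNodupKeysFold (f : Int → PySem.Set String) (ks : List Int)
    (d : PySem.Dict Int (PySem.Set String)) (hd : d.keys.Nodup) :
    (ks.foldl (fun d k => d.insert k (f k)) d).keys.Nodup := by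
  induction ks generalizing d with
  | nil => exact hd
  | cons k t ih => exact ih _ (PySem.Dict.nodup_keys_insert _ _ _ hd)

-- … and looks up to the inserted value
theorem pvGetD_fold_insert (ks : List Int) (f : Int → PySem.Set String) (L : Int)
    (hnd : ks.Nodup) (hL : L ∈ ks) :
    (ks.foldl (fun d k => d.insert k (f k)) PySem.Dict.empty).getD L [] = f L := by
  have hitems := PySem.Dict.items_foldl_insert_fresh ks (fun x => x) f PySem.Dict.empty
    (fun a _ => PySem.Dict.contains_empty a) (by simpa using hnd)
  have hmem : (L, f L) ∈ (ks.foldl (fun d k => d.insert k (f k)) PySem.Dict.empty).items := by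
    rw [hitems]; simp only [List.mem_append, List.mem_map]
    exact Or.inr ⟨L, hL, rfl⟩
  exact PySem.Dict.getD_of_get?_eq_some _ _
    (PySem.Dict.get?_of_mem_items _ hmem
      (pvNodupKeysFold f ks PySem.Dict.empty PySem.Dict.nodup_keys_empty))

-- A's enumerate loop, started at offset done.length, is 'all' over the zip
theorem pvLoopA_eq (text : String) (ps : List String) (rs done : List Bool)
    (h : rs.length = ps.length) :
    pvLoopA text (done ++ rs) (PySem.List.enumerate ps (done.length : Int))
      = (ps.zip rs).all (fun pr => pr.2 == PySem.Str.isIn pr.1 text) := by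
  induction ps generalizing rs done with
  | nil =>
    have : rs = [] := List.eq_nil_of_length_eq_zero (by simpa using h)
    subst this
    simp [PySem.List.enumerate_nil, pvLoopA]
  | cons p pt ih =>
    cases rs with
    | nil => simp at h
    | cons r rt =>
      have hget : PySem.List.pyGetD (done ++ r :: rt) (done.length : Int) false = r := by
        rw [PySem.List.pyGetD_natCast]
        simp [List.getD_eq_getElem?_getD]
      have hrec := ih rt (done ++ [r]) (by simpa using h)
      have hcast : (((done ++ [r]).length : Nat) : Int) = (done.length : Int) + 1 := by simp
      rw [List.append_assoc, List.singleton_append, hcast] at hrec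
      rw [PySem.List.enumerate_cons, List.zip_cons_cons, List.all_cons]
      simp only [pvLoopA]
      rw [hget]
      by_cases hr : r = PySem.Str.isIn p text
      · rw [if_neg (not_not_intro hr)]
        rw [hrec, hr]
        simp only [beq_self_eq_true, Bool.true_and]
      · rw [if_pos hr]
        have hb : (r == PySem.Str.isIn p text) = false := beq_eq_false_iff_ne.mpr hr
        rw [hb, Bool.false_and]

-- ===== VERDICT (by name: the statement is the Claim_ definition above) =====
theorem SPEC_spec : Claim_equal_SPEC := by
  intro text patterns result _
  unfold Spec_SPEC SPEC SPEC_alt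
  by_cases hlen : PySem.List.len result ≠ PySem.List.len patterns
  · rw [if_pos hlen, if_pos hlen]
  · rw [if_neg hlen, if_neg hlen]
    have h : result.length = patterns.length := by
      simpa [PySem.List.len_eq] using hlen
    have hA : pvLoopA text result (PySem.List.enumerate patterns)
        = (patterns.zip result).all (fun pr => pr.2 == PySem.Str.isIn pr.1 text) := by
      simpa using pvLoopA_eq text patterns result [] h
    rw [hA]
    apply pvAll_congr_mem
    rintro ⟨p, r⟩ hpr
    have hp : p ∈ patterns := (List.of_mem_zip hpr).1
    have hgd := pvGetD_fold_insert
      (PySem.Set.ofList (patterns.map (fun q => PySem.Str.len q)))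
      (fun L => pvSubsOfLen text (PySem.Str.len text) L) (PySem.Str.len p)
      (PySem.Set.nodup_ofList _)
      ((PySem.Set.mem_ofList _ _).mpr (List.mem_map_of_mem hp))
    dsimp only at hgd ⊢
    rw [hgd]
    have hiff := (PySem.Set.contains_iff
      (pvSubsOfLen text (PySem.Str.len text) (PySem.Str.len p)) p).trans
      (pvSubs_mem_iff text p)
    have hbe : (pvSubsOfLen text (PySem.Str.len text) (PySem.Str.len p)).contains p
        = PySem.Str.isIn p text := by
      cases hI : PySem.Str.isIn p text
      · apply Bool.eq_false_iff.mpr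
        intro hc
        rw [hiff.mp hc] at hI
        exact absurd hI (by simp)
      · exact hiff.mpr hI
    rw [hbe]
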